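-- pv_equiv track=rewrite | github.com/KishokG/Matter_PICS | Src/Scripts/conformance.py | find_all_matching_feature_variables
-- ===== SOURCE A (Python) =====
-- def find_all_matching_feature_variables(prefix, feature_names, features_data):
--     results = []
--     for feature in feature_names:
--         for row in features_data:
--             if row.get("PICS name", "").strip() == feature.strip():
--                 variable = row.get("Variable", "").strip()
--                 if not prefix or variable.startswith(prefix + "."):
--                     results.append(variable)
--     return results
-- ===== SOURCE B (Python) =====
-- def find_all_matching_feature_variables(prefix, feature_names, features_data):
--     # One pass over the rows builds an index keyed by stripped PICS name,
--     # keeping only prefix-matching variables; each feature is then a dict lookup.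
--     pairs = []
--     for row in features_data:
--         variable = row.get("Variable", "").strip()
--         if not prefix or variable.startswith(prefix + "."):
--             pairs.append((row.get("PICS name", "").strip(), variable))
--     index = {}
--     for key, variable in pairs:
--         index.setdefault(key, []).append(variable)
--     results = []
--     for feature in feature_names:
--         results += index.get(feature.strip(), [])
--     return results
-- ===== Notes on version B (the rewrite author's own statement) =====
-- stated objective: faster
-- what changed: Instead of rescanning all rows for every feature, B builds a PICS-name -> variables index (prefix-filtered, row order preserved) in one pass and answers each feature by a dict lookup.
import Mathlib
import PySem

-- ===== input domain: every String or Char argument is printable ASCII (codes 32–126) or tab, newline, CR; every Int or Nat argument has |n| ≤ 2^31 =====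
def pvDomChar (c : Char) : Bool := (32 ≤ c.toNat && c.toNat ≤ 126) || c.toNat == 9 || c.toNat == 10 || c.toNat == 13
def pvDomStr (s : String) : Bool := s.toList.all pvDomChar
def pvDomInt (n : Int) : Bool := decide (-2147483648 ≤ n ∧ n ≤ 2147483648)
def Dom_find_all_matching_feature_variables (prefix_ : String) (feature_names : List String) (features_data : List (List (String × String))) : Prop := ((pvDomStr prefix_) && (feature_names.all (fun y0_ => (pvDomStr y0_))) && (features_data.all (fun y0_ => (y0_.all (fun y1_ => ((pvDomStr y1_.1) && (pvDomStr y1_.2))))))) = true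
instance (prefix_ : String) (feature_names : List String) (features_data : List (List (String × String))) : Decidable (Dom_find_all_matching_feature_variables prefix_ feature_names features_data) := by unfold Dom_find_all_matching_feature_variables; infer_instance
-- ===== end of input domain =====

-- B replaces A's per-feature scan of all rows by a single pass building a
-- PICS-name → variables index, then one dict lookup per feature (objective: faster, O(F·R) → O(F+R)).

-- ===== PORT A =====
def find_all_matching_feature_variables (prefix_ : String) (feature_names : List String) (features_data : List (List (String × String))) : List String :=
  feature_names.foldl (fun results feature =>
    features_data.foldl (fun results row =>
      if PySem.Str.strip ((PySem.Dict.mk row).getD "PICS name" "") = PySem.Str.strip feature then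
        let variable_ := PySem.Str.strip ((PySem.Dict.mk row).getD "Variable" "")
        if prefix_ = "" || PySem.Str.startswith variable_ (prefix_ ++ ".") then
          results ++ [variable_]
        else results
      else results) results) []

-- ===== PORT B =====
def find_all_matching_feature_variables_alt (prefix_ : String) (feature_names : List String) (features_data : List (List (String × String))) : List String :=
  let pairs := features_data.foldl (fun pairs row =>
    let variable_ := PySem.Str.strip ((PySem.Dict.mk row).getD "Variable" "")
    if prefix_ = "" || PySem.Str.startswith variable_ (prefix_ ++ ".") then
      pairs ++ [(PySem.Str.strip ((PySem.Dict.mk row).getD "PICS name" ""), variable_)]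
    else pairs) []
  let index := pairs.foldl (fun d p => d.modify p.1 [] (· ++ [p.2])) PySem.Dict.empty
  feature_names.foldl (fun results feature =>
    results ++ index.getD (PySem.Str.strip feature) []) []

-- ===== PRECONDITION & SPEC =====
def Spec_find_all_matching_feature_variables (prefix_ : String) (feature_names : List String) (features_data : List (List (String × String))) (out : List String) : Prop := out = find_all_matching_feature_variables_alt prefix_ feature_names features_data
instance (prefix_ : String) (feature_names : List String) (features_data : List (List (String × String))) (out : List String) : Decidable (Spec_find_all_matching_feature_variables prefix_ feature_names features_data out) := by unfold Spec_find_all_matching_feature_variables; infer_instance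

-- ===== CLAIM (what is proved, stated in full; the proofs are below) =====
def Claim_equal_find_all_matching_feature_variables : Prop := ∀ (prefix_ : String) (feature_names : List String) (features_data : List (List (String × String))), Dom_find_all_matching_feature_variables prefix_ feature_names features_data → Spec_find_all_matching_feature_variables prefix_ feature_names features_data (find_all_matching_feature_variables prefix_ feature_names features_data)

-- ===== LEMMAS AND PROOFS =====

-- abbreviations for the row fields (proof-only)
def pvKey (row : List (String × String)) : String := PySem.Str.strip ((PySem.Dict.mk row).getD "PICS name" "")
def pvVar (row : List (String × String)) : String := PySem.Str.strip ((PySem.Dict.mk row).getD "Variable" "")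
def pvOk (prefix_ : String) (v : String) : Bool := prefix_ = "" || PySem.Str.startswith v (prefix_ ++ ".")

-- A's inner loop over the rows, for one feature, as filter+map
theorem pvA_inner (prefix_ feature : String) (rows : List (List (String × String))) (acc : List String) :
    rows.foldl (fun results row =>
      if PySem.Str.strip ((PySem.Dict.mk row).getD "PICS name" "") = PySem.Str.strip feature then
        let variable_ := PySem.Str.strip ((PySem.Dict.mk row).getD "Variable" "")
        if prefix_ = "" || PySem.Str.startswith variable_ (prefix_ ++ ".") then
          results ++ [variable_]
        else results
      else results) acc
    = acc ++ ((rows.filter (fun row => pvKey row == PySem.Str.strip feature && pvOk prefix_ (pvVar row))).map pvVar) := by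
  rw [← PySem.List.foldl_append_if]
  apply PySem.List.foldl_congr_mem
  intro a r _
  by_cases h1 : pvKey r = PySem.Str.strip feature <;>
    simp [pvKey, pvVar, pvOk] at h1 ⊢ <;> simp [h1]

-- A as a flatMap over the features
theorem pvA_eq (prefix_ : String) (fd : List (List (String × String))) :
    ∀ (fns : List String) (acc : List String),
    fns.foldl (fun results feature =>
      fd.foldl (fun results row =>
        if PySem.Str.strip ((PySem.Dict.mk row).getD "PICS name" "") = PySem.Str.strip feature then
          let variable_ := PySem.Str.strip ((PySem.Dict.mk row).getD "Variable" "")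
          if prefix_ = "" || PySem.Str.startswith variable_ (prefix_ ++ ".") then
            results ++ [variable_]
          else results
        else results) results) acc
    = acc ++ fns.flatMap (fun feature =>
        (fd.filter (fun row => pvKey row == PySem.Str.strip feature && pvOk prefix_ (pvVar row))).map pvVar) := by
  intro fns
  induction fns with
  | nil => intro acc; simp
  | cons f rest ih =>
    intro acc
    simp only [List.foldl_cons, List.flatMap_cons]
    rw [pvA_inner, ih, List.append_assoc]

-- B as a flatMap over the features
theorem pvB_eq (prefix_ : String) (fns : List String) (fd : List (List (String × String))) :
    find_all_matching_feature_variables_alt prefix_ fns fd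
    = fns.flatMap (fun feature =>
        (((fd.filter (fun row => pvOk prefix_ (pvVar row))).map (fun row => (pvKey row, pvVar row))).filter
          (fun p => p.1 == PySem.Str.strip feature)).map (·.2)) := by
  unfold find_all_matching_feature_variables_alt
  rw [show (fd.foldl (fun pairs row =>
      let variable_ := PySem.Str.strip ((PySem.Dict.mk row).getD "Variable" "")
      if prefix_ = "" || PySem.Str.startswith variable_ (prefix_ ++ ".") then
        pairs ++ [(PySem.Str.strip ((PySem.Dict.mk row).getD "PICS name" ""), variable_)]
      else pairs) [])
    = ((fd.filter (fun row => pvOk prefix_ (pvVar row))).map (fun row => (pvKey row, pvVar row)))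
    from by
      simpa [pvKey, pvVar, pvOk] using
        PySem.List.foldl_append_if (l := fd)
          (p := fun row => pvOk prefix_ (pvVar row))
          (f := fun row => (pvKey row, pvVar row)) (acc := [])]
  simp only [PySem.List.foldl_append_eq_flatMap, PySem.Dict.getD_foldl_modify_append,
    PySem.Dict.getD_empty, List.nil_append]

theorem find_all_matching_feature_variables_spec' (prefix_ : String) (feature_names : List String) (features_data : List (List (String × String))) :
    find_all_matching_feature_variables prefix_ feature_names features_data
    = find_all_matching_feature_variables_alt prefix_ feature_names features_data := by
  rw [pvB_eq]
  unfold find_all_matching_feature_variables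
  rw [pvA_eq prefix_ features_data feature_names []]
  simp [List.filter_map, Function.comp_def, List.filter_filter, Bool.and_comm]

-- ===== VERDICT (by name: the statement is the Claim_ definition above) =====
theorem find_all_matching_feature_variables_spec : Claim_equal_find_all_matching_feature_variables := by
  intro p fn fd _
  exact find_all_matching_feature_variables_spec' p fn fd
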